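-- pv_equiv track=rewrite | github.com/tiagosilvaalopes/Projects | python-GeneticAlgorithm/AutomatoCelular.py | combination_list
-- ===== SOURCE A (Python) =====
-- def ternary (n):
--     if n == 0:
--         return '0'
--     nums = []
--     while n:
--         n, r = divmod(n, 3)
--         nums.append(str(r))
--     return ''.join(reversed(nums))
--
-- def combination_list(neighborhoodSize, rule, k):
--     combination = {}
--     for i in range(len(rule)):
--         if k == 2:
--             config = list(bin(i)[2:].zfill(neighborhoodSize))
--         else:
--             config = list(ternary(i).zfill(neighborhoodSize))
--
--         config = config[::-1
--         ]
--         configList = list(map(int, config))  # passar de strings para ints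
--         configList = tuple(configList)  # criar tuplo com os inteiros
--
--         combination[configList] = rule[i]
--
--     return combination
-- ===== SOURCE B (Python) =====
-- def _inc(cfg, base):
--     # add one to a little-endian digit counter, growing it on overflow
--     if not cfg:
--         return [1]
--     if cfg[0] == base - 1:
--         return [0] + _inc(cfg[1:], base)
--     return [cfg[0] + 1] + cfg[1:]
--
--
-- def combination_list(neighborhoodSize, rule, k):
--     base = 2 if k == 2 else 3
--     cfg = [0] * max(neighborhoodSize, 1)
--     combination = {}
--     for v in rule:
--         combination[tuple(cfg)] = v
--         cfg = _inc(cfg, base)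
--     return combination
-- ===== Notes on version B (the rewrite author's own statement) =====
-- stated objective: faster
-- what changed: B never derives a digit representation per index: it keeps one little-endian digit counter (an odometer) initialised to max(neighborhoodSize,1) zeros and increments it with carry once per rule entry (growing it on overflow), whereas A re-derives each key from scratch via bin()/a hand-written ternary string, zfill, reversal and mapping int over characters; intended as faster, measured ~2.4-2.7x in a timing run at every size both finished (unconfirmed at the largest size, where both time out on some inputs).
import Mathlib
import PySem

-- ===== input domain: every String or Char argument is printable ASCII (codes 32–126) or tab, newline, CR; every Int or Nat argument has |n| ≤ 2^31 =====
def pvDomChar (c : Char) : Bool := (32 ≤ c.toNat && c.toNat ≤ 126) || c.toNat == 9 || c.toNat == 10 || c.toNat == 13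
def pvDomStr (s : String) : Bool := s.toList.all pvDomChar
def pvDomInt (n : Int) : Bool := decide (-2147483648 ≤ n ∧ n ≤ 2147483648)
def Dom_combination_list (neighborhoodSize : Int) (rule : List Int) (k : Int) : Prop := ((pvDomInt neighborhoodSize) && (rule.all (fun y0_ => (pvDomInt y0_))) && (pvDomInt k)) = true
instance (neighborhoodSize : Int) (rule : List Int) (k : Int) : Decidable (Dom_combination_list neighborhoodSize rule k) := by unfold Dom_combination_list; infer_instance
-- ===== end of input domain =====

-- B replaces A's per-index digit derivation (bin()/hand-written ternary string, zfill,
-- reversal, map int) by a single little-endian odometer counter incremented with carry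
-- once per rule entry; intended as faster (measured ~2.4-2.7x in a timing run at
-- every size where both programs finished; unconfirmed at the largest size).

-- ===== PORT A =====
-- port of the loop of helper 'ternary': while n: n, r = divmod(n, 3); nums.append(str(r)).
-- The guard 0 < n (Python: n ≠ 0) only makes the recursion total; ternary is only
-- called with n ≥ 0, where the two conditions agree.
def pvTernaryLoop (n : Int) (nums : List (List Char)) : List (List Char) :=
  if _h : 0 < n then
    pvTernaryLoop (PySem.Int.floordiv n 3) (nums ++ [PySem.Int.toChars (PySem.Int.mod n 3)])
  else nums
termination_by n.toNat
decreasing_by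
  have h3 : PySem.Int.floordiv n 3 = n / 3 := PySem.Int.floordiv_eq_ediv_of_pos (by omega)
  rw [h3]; omega

-- port of 'ternary' (as its character list): ''.join(reversed(nums)), '0' for n == 0
def pvTernary (n : Int) : List Char :=
  if n = 0 then ['0']
  else PySem.Chars.join [] (pvTernaryLoop n []).reverse

-- hand-written port of the builtin bin(i)[2:]; exact for n ≥ 0 (the only calls A makes)
def pvBinLoop (n : Int) (acc : List Char) : List Char :=
  if _h : 0 < n then
    pvBinLoop (PySem.Int.floordiv n 2) (PySem.Int.toChars (PySem.Int.mod n 2) ++ acc)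
  else acc
termination_by n.toNat
decreasing_by
  have h2 : PySem.Int.floordiv n 2 = n / 2 := PySem.Int.floordiv_eq_ediv_of_pos (by omega)
  rw [h2]; omega

def pvBin (n : Int) : List Char := if n = 0 then ['0'] else pvBinLoop n []

-- A's loop body: the key built for index i
def pvKeyA (neighborhoodSize : Int) (k : Int) (i : Int) : List Int :=
  ((if k = 2 then PySem.Chars.zfill (pvBin i) neighborhoodSize
    else PySem.Chars.zfill (pvTernary i) neighborhoodSize).reverse   -- config[::-1]
   ).map (fun c => (PySem.Int.ofChars? [c]).getD 0)   -- int(c); every c is a digit here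

def combination_list (neighborhoodSize : Int) (rule : List Int) (k : Int) : List (List Int × Int) :=
  ((PySem.List.pyRange 0 (rule.length : Int) 1).foldl
    (fun (d : PySem.Dict (List Int) Int) i =>
      d.insert (pvKeyA neighborhoodSize k i) (PySem.List.pyGetD rule i 0))
    PySem.Dict.empty).items

-- ===== PORT B =====
-- B's helper _inc: add one to a little-endian digit counter, growing it on overflow
def pvInc (base : Int) : List Int → List Int
  | [] => [1]
  | d :: ds => if d = base - 1 then 0 :: pvInc base ds else (d + 1) :: ds

-- B's loop: for v in rule: combination[tuple(cfg)] = v; cfg = _inc(cfg, base)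
def combination_list_alt (neighborhoodSize : Int) (rule : List Int) (k : Int) : List (List Int × Int) :=
  let base : Int := if k = 2 then 2 else 3
  (rule.foldl
    (fun (st : PySem.Dict (List Int) Int × List Int) v =>
      (st.1.insert st.2 v, pvInc base st.2))
    (PySem.Dict.empty, List.replicate (max neighborhoodSize 1).toNat 0)).1.items

-- ===== PRECONDITION & SPEC =====
def Spec_combination_list (neighborhoodSize : Int) (rule : List Int) (k : Int) (out : List (List Int × Int)) : Prop := out = combination_list_alt neighborhoodSize rule k
instance (neighborhoodSize : Int) (rule : List Int) (k : Int) (out : List (List Int × Int)) : Decidable (Spec_combination_list neighborhoodSize rule k out) := by unfold Spec_combination_list; infer_instance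

-- ===== CLAIM (what is proved, stated in full; the proofs are below) =====
def Claim_equal_combination_list : Prop := ∀ (neighborhoodSize : Int) (rule : List Int) (k : Int), Dom_combination_list neighborhoodSize rule k → Spec_combination_list neighborhoodSize rule k (combination_list neighborhoodSize rule k)

-- ===== LEMMAS AND PROOFS =====

-- the digit list of i (least-significant first), shared yardstick of both proofs
def pvDigits (base : Int) (n : Int) : List Int :=
  if _h : 0 < n ∧ 1 < base then
    PySem.Int.mod n base :: pvDigits base (PySem.Int.floordiv n base)
  else []
termination_by n.toNat
decreasing_by
  have hb : PySem.Int.floordiv n base = n / base := PySem.Int.floordiv_eq_ediv_of_pos (by omega)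
  rw [hb]
  have h1 : n / base * base ≤ n := Int.ediv_mul_le n (by omega)
  have h2 : 0 ≤ n / base := Int.ediv_nonneg (by omega) (by omega)
  have h3 : n / base < n := by nlinarith
  omega

-- right-padding with zeros to width w
def pvPad (w : Nat) (L : List Int) : List Int := L ++ List.replicate (w - L.length) 0

lemma pvDigits_pos (base n : Int) (h : 0 < n) (hb : 1 < base) :
    pvDigits base n = PySem.Int.mod n base :: pvDigits base (PySem.Int.floordiv n base) := by
  rw [pvDigits]; simp [h, hb]

lemma pvDigits_nonpos (base n : Int) (h : ¬ 0 < n) : pvDigits base n = [] := by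
  rw [pvDigits]; simp [h]

-- every digit produced lies in [0, base)
lemma pvDigits_mem (base n : Int) (hb : 1 < base) :
    ∀ x ∈ pvDigits base n, 0 ≤ x ∧ x < base := by
  generalize hm : n.toNat = m
  induction m using Nat.strong_induction_on generalizing n with
  | _ m ih =>
    by_cases h : 0 < n
    · rw [pvDigits_pos base n h hb]
      have hq : PySem.Int.floordiv n base = n / base :=
        PySem.Int.floordiv_eq_ediv_of_pos (by omega)
      have h1 : n / base * base ≤ n := Int.ediv_mul_le n (by omega)
      have h2 : 0 ≤ n / base := Int.ediv_nonneg (by omega) (by omega)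
      have h3 : n / base < n := by nlinarith
      intro x hx
      rcases List.mem_cons.mp hx with h' | h'
      · subst h'
        exact ⟨PySem.Int.mod_nonneg n (by omega), PySem.Int.mod_lt n (by omega)⟩
      · exact ih (n / base).toNat (by omega) _ rfl x (by rwa [hq] at h')
    · rw [pvDigits_nonpos base n h]; simp

-- digit character helpers
lemma pvToChars_digit (d : Int) (h0 : 0 ≤ d) (h3 : d < 3) :
    PySem.Int.toChars d = [Char.ofNat (48 + d.toNat)] := by
  interval_cases d <;> decide

lemma pvInt_of_digitChar (d : Int) (h0 : 0 ≤ d) (h3 : d < 3) :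
    (PySem.Int.ofChars? [Char.ofNat (48 + d.toNat)]).getD 0 = d := by
  interval_cases d <;> decide

-- A's bin loop is the base-2 digit list, reversed and rendered as characters
lemma pvBinLoop_eq (n : Int) (acc : List Char) (h : 0 < n) :
    pvBinLoop n acc =
      ((pvDigits 2 n).reverse.map (fun d => Char.ofNat (48 + d.toNat))) ++ acc := by
  generalize hm : n.toNat = m
  induction m using Nat.strong_induction_on generalizing n acc with
  | _ m ih =>
    have hq : PySem.Int.floordiv n 2 = n / 2 := PySem.Int.floordiv_eq_ediv_of_pos (by omega)
    have h1 : n / 2 * 2 ≤ n := Int.ediv_mul_le n (by omega)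
    have h2 : 0 ≤ n / 2 := Int.ediv_nonneg (by omega) (by omega)
    have h3 : n / 2 < n := by nlinarith
    have hr0 : 0 ≤ PySem.Int.mod n 2 := PySem.Int.mod_nonneg n (by omega)
    have hr2 : PySem.Int.mod n 2 < 2 := PySem.Int.mod_lt n (by omega)
    have hch : PySem.Int.toChars (PySem.Int.mod n 2) =
        [Char.ofNat (48 + (PySem.Int.mod n 2).toNat)] := pvToChars_digit _ hr0 (by omega)
    rw [pvBinLoop]
    simp only [dif_pos h]
    rw [pvDigits_pos 2 n h (by norm_num)]
    by_cases hp : 0 < PySem.Int.floordiv n 2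
    · rw [ih (PySem.Int.floordiv n 2).toNat (by omega) _ _ hp rfl]
      rw [hch]
      simp [List.append_assoc]
    · rw [pvBinLoop]
      rw [dif_neg hp, pvDigits_nonpos _ _ hp, hch]
      simp

-- A's ternary loop is the base-3 digit list rendered as one-character strings
lemma pvTernaryLoop_eq (n : Int) (nums : List (List Char)) :
    pvTernaryLoop n nums = nums ++ (pvDigits 3 n).map PySem.Int.toChars := by
  generalize hm : n.toNat = m
  induction m using Nat.strong_induction_on generalizing n nums with
  | _ m ih =>
    by_cases h : 0 < n
    · have hq : PySem.Int.floordiv n 3 = n / 3 := PySem.Int.floordiv_eq_ediv_of_pos (by omega)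
      have h1 : n / 3 * 3 ≤ n := Int.ediv_mul_le n (by omega)
      have h2 : 0 ≤ n / 3 := Int.ediv_nonneg (by omega) (by omega)
      have h3 : n / 3 < n := by nlinarith
      rw [pvTernaryLoop]
      simp only [dif_pos h]
      rw [ih (PySem.Int.floordiv n 3).toNat (by omega) _ _ rfl]
      rw [pvDigits_pos 3 n h (by norm_num)]
      simp [List.append_assoc]
    · rw [pvTernaryLoop]
      simp [h, pvDigits_nonpos _ _ h]

-- the characters A works on, uniformly in the base
lemma pvChars_eq (b : Int) (n : Int) (hn : 0 < n) (hb : b = 2 ∨ b = 3) :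
    (if b = 2 then pvBin n else pvTernary n) =
      (pvDigits b n).reverse.map (fun d => Char.ofNat (48 + d.toNat)) := by
  rcases hb with hb | hb <;> subst hb
  · rw [if_pos rfl]
    unfold pvBin
    rw [if_neg (by omega), pvBinLoop_eq n [] hn]
    simp
  · rw [if_neg (by norm_num)]
    unfold pvTernary
    rw [if_neg (by omega), pvTernaryLoop_eq n []]
    have hmem := pvDigits_mem 3 n (by norm_num)
    simp only [List.nil_append, ← List.map_reverse]
    rw [List.map_congr_left (f := PySem.Int.toChars)
        (g := fun d => [Char.ofNat (48 + d.toNat)]) ?hcong]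
    · have := PySem.Chars.join_nil_singletons
        ((pvDigits 3 n).reverse.map (fun d => Char.ofNat (48 + d.toNat)))
      rw [List.map_map] at this
      exact this
    · intro d hd
      have := hmem d (List.mem_reverse.mp hd)
      exact pvToChars_digit d this.1 this.2

-- mapping int over the rendered digit characters recovers the digits
lemma pvMapg_digits (b : Int) (hb : b = 2 ∨ b = 3) (L : List Int)
    (hmem : ∀ x ∈ L, 0 ≤ x ∧ x < b) :
    (L.map (fun d => Char.ofNat (48 + d.toNat))).map
      (fun ch => (PySem.Int.ofChars? [ch]).getD 0) = L := by
  rw [List.map_map]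
  conv_rhs => rw [← List.map_id L]
  apply List.map_congr_left
  intro d hd
  have h := hmem d hd
  simpa using pvInt_of_digitChar d h.1 (by rcases hb with hb | hb <;> omega)

-- A's key is the padded digit list
lemma pvKeyA_eq_pad (ns k i : Int) (hi : 0 ≤ i) :
    pvKeyA ns k i = pvPad (max ns 1).toNat (pvDigits (if k = 2 then 2 else 3) i) := by
  have hb23 : (if k = 2 then (2 : Int) else 3) = 2 ∨ (if k = 2 then (2 : Int) else 3) = 3 := by
    by_cases hk : k = 2 <;> simp [hk]
  set b : Int := if k = 2 then 2 else 3 with hbdef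
  have hb : 1 < b := by rcases hb23 with h | h <;> omega
  unfold pvKeyA pvPad
  rw [← apply_ite (fun cs => PySem.Chars.zfill cs ns)]
  by_cases hi0 : 0 < i
  · have hmem : ∀ x ∈ pvDigits b i, 0 ≤ x ∧ x < b := pvDigits_mem b i hb
    have hLne : pvDigits b i ≠ [] := by
      rw [pvDigits_pos b i hi0 hb]; simp
    have hlen1 : 1 ≤ (pvDigits b i).length := by
      cases hL : pvDigits b i with
      | nil => exact absurd hL hLne
      | cons a t => simp
    have hsel : (if k = 2 then pvBin i else pvTernary i) =
        (pvDigits b i).reverse.map (fun d => Char.ofNat (48 + d.toNat)) := by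
      have h1 : (if k = 2 then pvBin i else pvTernary i) =
          (if b = 2 then pvBin i else pvTernary i) := by
        by_cases hk : k = 2 <;> simp [hbdef, hk]
      rw [h1]; exact pvChars_eq b i hi0 hb23
    rw [hsel]
    by_cases hns : ns ≤ ((pvDigits b i).length : Int)
    · -- no padding on either side
      have hz : PySem.Chars.zfill
          ((pvDigits b i).reverse.map (fun d => Char.ofNat (48 + d.toNat))) ns =
          (pvDigits b i).reverse.map (fun d => Char.ofNat (48 + d.toNat)) := by
        unfold PySem.Chars.zfill
        rw [if_pos (by simpa using hns)]
      rw [hz, ← List.map_reverse, List.reverse_reverse, pvMapg_digits b hb23 _ hmem]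
      rw [show ((max ns 1).toNat - (pvDigits b i).length) = 0 by omega]
      simp
    · -- A pads on the left, B on the right
      obtain ⟨d, t, hrev⟩ : ∃ d t, (pvDigits b i).reverse = d :: t := by
        cases hL : (pvDigits b i).reverse with
        | nil => exact absurd (by simpa using hL) hLne
        | cons a t => exact ⟨a, t, rfl⟩
      have hd : 0 ≤ d ∧ d < b := hmem d (by rw [← List.mem_reverse, hrev]; simp)
      have hsign : ¬(Char.ofNat (48 + d.toNat) = '+' ∨ Char.ofNat (48 + d.toNat) = '-') := by
        have hd3 : d = 0 ∨ d = 1 ∨ d = 2 := by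
          rcases hb23 with hb' | hb' <;> omega
        rcases hd3 with h | h | h <;> subst h <;> decide
      have hz : PySem.Chars.zfill
          ((pvDigits b i).reverse.map (fun d => Char.ofNat (48 + d.toNat))) ns =
          List.replicate (ns.toNat - (pvDigits b i).length) '0' ++
            (pvDigits b i).reverse.map (fun d => Char.ofNat (48 + d.toNat)) := by
        have hLlen : (pvDigits b i).length = t.length + 1 := by
          have h := congrArg List.length hrev
          simpa using h
        rw [hrev]
        simp only [List.map_cons]
        unfold PySem.Chars.zfill
        rw [if_neg (by simp only [List.length_cons, List.length_map]; omega)]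
        simp only [List.length_cons, List.length_map, hLlen]
        rw [if_neg hsign]
      rw [hz, List.reverse_append, List.reverse_replicate, List.map_append,
        ← List.map_reverse, List.reverse_reverse, pvMapg_digits b hb23 _ hmem,
        List.map_replicate]
      rw [show (PySem.Int.ofChars? ['0']).getD 0 = (0 : Int) from by decide]
      congr 1
      congr 1
      omega
  · -- i = 0
    have hi' : i = 0 := by omega
    subst hi'
    have hnil : pvDigits b 0 = [] := pvDigits_nonpos b 0 (by omega)
    have hsel : (if k = 2 then pvBin 0 else pvTernary 0) = ['0'] := by
      by_cases hk : k = 2 <;> simp [hk, pvBin, pvTernary]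
    rw [hsel, hnil]
    simp only [List.length_nil, Nat.sub_zero, List.nil_append]
    by_cases hns : ns ≤ 1
    · have hz : PySem.Chars.zfill ['0'] ns = ['0'] := by
        unfold PySem.Chars.zfill
        rw [if_pos (by simpa using hns)]
      rw [hz, show (max ns 1).toNat = 1 by omega]
      decide
    · have hz : PySem.Chars.zfill ['0'] ns = List.replicate (ns.toNat - 1) '0' ++ ['0'] := by
        unfold PySem.Chars.zfill
        rw [if_neg (by simpa using hns)]
        simp only [List.length_cons, List.length_nil]
        rw [if_neg (by decide)]
      rw [hz, List.reverse_append, List.reverse_replicate, List.map_append, List.map_replicate]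
      rw [show (PySem.Int.ofChars? ['0']).getD 0 = (0 : Int) from by decide]
      rw [show (max ns 1).toNat = (ns.toNat - 1) + 1 by omega, List.replicate_succ]
      rfl

-- padding a cons peels to padding the tail one narrower
lemma pvPad_cons (w : Nat) (x : Int) (L : List Int) :
    pvPad w (x :: L) = x :: pvPad (w - 1) L := by
  unfold pvPad
  simp only [List.cons_append, List.length_cons]
  have h : w - (L.length + 1) = w - 1 - L.length := by omega
  rw [h]

-- the odometer step: incrementing the padded digits of i gives the padded digits of i+1
lemma pvInc_pad (b : Int) (hb23 : b = 2 ∨ b = 3) (w : Nat) (i : Int) (hi : 0 ≤ i) :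
    pvInc b (pvPad w (pvDigits b i)) = pvPad w (pvDigits b (i + 1)) := by
  have hb : 1 < b := by rcases hb23 with h | h <;> omega
  generalize hm : i.toNat = m
  induction m using Nat.strong_induction_on generalizing i w with
  | _ m ih =>
    by_cases hi0 : 0 < i
    · have hq : PySem.Int.floordiv i b = i / b := PySem.Int.floordiv_eq_ediv_of_pos (by omega)
      have hmod : PySem.Int.mod i b = i % b := PySem.Int.mod_eq_emod_of_pos (by omega)
      have hq' : PySem.Int.floordiv (i + 1) b = (i + 1) / b :=
        PySem.Int.floordiv_eq_ediv_of_pos (by omega)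
      have hmod' : PySem.Int.mod (i + 1) b = (i + 1) % b :=
        PySem.Int.mod_eq_emod_of_pos (by omega)
      rw [pvDigits_pos b i hi0 hb, pvDigits_pos b (i + 1) (by omega) hb, pvPad_cons, pvPad_cons]
      by_cases hc : PySem.Int.mod i b = b - 1
      · -- carry: head resets to 0, the quotient is bumped
        have hstep : (i + 1) / b = i / b + 1 ∧ (i + 1) % b = 0 := by
          rw [hmod] at hc
          rcases hb23 with h | h <;> subst h <;> omega
        have hdivpos : 0 ≤ i / b := Int.ediv_nonneg (by omega) (by omega)
        have hlt : i / b < i := by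
          have h1 : i / b * b ≤ i := Int.ediv_mul_le i (by omega)
          nlinarith
        rw [pvInc, if_pos hc]
        rw [hmod', hstep.2, hq', hstep.1, hq]
        rw [ih (i / b).toNat (by omega) (w - 1) (i / b) hdivpos rfl]
      · -- no carry: the head is bumped, the tail is unchanged
        have hr0 : 0 ≤ PySem.Int.mod i b := PySem.Int.mod_nonneg i (by omega)
        have hrb : PySem.Int.mod i b < b := PySem.Int.mod_lt i (by omega)
        have hstep : (i + 1) / b = i / b ∧ (i + 1) % b = i % b + 1 := by
          rw [hmod] at hc
          rcases hb23 with h | h <;> subst h <;> omega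
        rw [pvInc, if_neg hc]
        rw [hmod', hstep.2, hmod, hq', hstep.1, hq]
    · -- i = 0: the counter is all zeros; the result is 1 followed by zeros
      have hi' : i = 0 := by omega
      subst hi'
      have h0 : pvDigits b 0 = [] := pvDigits_nonpos b 0 (by omega)
      have h1 : pvDigits b 1 = [1] := by
        rw [pvDigits_pos b 1 (by omega) hb]
        have hq : PySem.Int.floordiv 1 b = 1 / b := PySem.Int.floordiv_eq_ediv_of_pos (by omega)
        have hmod : PySem.Int.mod 1 b = 1 % b := PySem.Int.mod_eq_emod_of_pos (by omega)
        have hz : (1 : Int) / b = 0 ∧ (1 : Int) % b = 1 := by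
          rcases hb23 with h | h <;> subst h <;> omega
        rw [hq, hz.1, hmod, hz.2, pvDigits_nonpos b 0 (by omega)]
      rw [show (0 : Int) + 1 = 1 from rfl, h0, h1]
      unfold pvPad
      cases w with
      | zero => simp [pvInc]
      | succ w' =>
        simp only [List.nil_append, List.length_nil, Nat.sub_zero, List.replicate_succ]
        rw [pvInc]
        rw [if_neg (by rcases hb23 with h | h <;> subst h <;> decide)]
        simp

-- B's fold, run from the counter state for index i, equals inserting the padded
-- digit keys for indices i, i+1, … (stated against A's enumerate-style fold)
lemma pvFoldB_eq (b : Int) (hb23 : b = 2 ∨ b = 3) (w : Nat) :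
    ∀ (xs : List Int) (i : Int), 0 ≤ i → ∀ (d : PySem.Dict (List Int) Int),
    (xs.foldl (fun (st : PySem.Dict (List Int) Int × List Int) v =>
        (st.1.insert st.2 v, pvInc b st.2)) (d, pvPad w (pvDigits b i))).1 =
    (PySem.List.enumerate xs i).foldl
      (fun (d : PySem.Dict (List Int) Int) p => d.insert (pvPad w (pvDigits b p.1)) p.2) d := by
  intro xs
  induction xs with
  | nil => intro i hi d; simp [PySem.List.enumerate]
  | cons x xs ih =>
    intro i hi d
    rw [PySem.List.enumerate_cons]
    simp only [List.foldl_cons]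
    rw [pvInc_pad b hb23 w i hi]
    exact ih (i + 1) (by omega) _

-- enumerate pairs: index bounds and the value at the index
lemma pvEnum_mem (xs : List Int) (s : Int) (p : Int × Int) (h : p ∈ PySem.List.enumerate xs s) :
    s ≤ p.1 ∧ PySem.List.pyGetD xs (p.1 - s) 0 = p.2 := by
  induction xs generalizing s with
  | nil => simp [PySem.List.enumerate] at h
  | cons x xs ih =>
    rw [PySem.List.enumerate_cons] at h
    rcases List.mem_cons.mp h with h' | h'
    · subst h'
      refine ⟨le_refl _, ?_⟩
      rw [sub_self, PySem.List.pyGetD_of_nonneg _ _ (by omega)]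
      simp
    · obtain ⟨h1, h2⟩ := ih (s + 1) h'
      refine ⟨by omega, ?_⟩
      rw [PySem.List.pyGetD_of_nonneg _ _ (by omega)] at h2 ⊢
      rw [show (p.1 - s).toNat = (p.1 - (s + 1)).toNat + 1 by omega]
      simpa using h2

-- ===== VERDICT (by name: the statement is the Claim_ definition above) =====
theorem combination_list_spec : Claim_equal_combination_list := by
  intro ns rule k _hdom
  unfold Spec_combination_list
  simp only [combination_list, combination_list_alt]
  congr 1
  have hb23 : (if k = 2 then (2 : Int) else 3) = 2 ∨ (if k = 2 then (2 : Int) else 3) = 3 := by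
    by_cases hk : k = 2 <;> simp [hk]
  have h0 : List.replicate (max ns 1).toNat (0 : Int) =
      pvPad (max ns 1).toNat (pvDigits (if k = 2 then 2 else 3) 0) := by
    rw [pvDigits_nonpos _ 0 (by omega)]
    simp [pvPad]
  rw [h0, pvFoldB_eq (if k = 2 then 2 else 3) hb23 (max ns 1).toNat rule 0 (by omega)]
  rw [show PySem.List.pyRange 0 (rule.length : Int) 1 =
      (PySem.List.enumerate rule 0).map (·.1) from by
    rw [PySem.List.map_fst_enumerate]; norm_num]
  rw [List.foldl_map]
  apply PySem.List.foldl_congr_mem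
  intro acc p hp
  obtain ⟨h1, h2⟩ := pvEnum_mem rule 0 p hp
  rw [sub_zero] at h2
  rw [h2, pvKeyA_eq_pad ns k p.1 (by omega)]
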